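-- pv_equiv track=rewrite | github.com/MikeHLee/dot_swarm | gen_logo.py | pixel_set
-- ===== SOURCE A (Python) =====
-- FONT = {
--     'D': [0b11110,0b10001,0b10001,0b10001,0b10001,0b10001,0b10001,0b10001,0b11110],
--     'O': [0b01110,0b10001,0b10001,0b10001,0b10001,0b10001,0b10001,0b10001,0b01110],
--     'T': [0b11111,0b00100,0b00100,0b00100,0b00100,0b00100,0b00100,0b00100,0b00100],
--     'S': [0b01111,0b10000,0b10000,0b10000,0b01110,0b00001,0b00001,0b00001,0b11110],
--     'W': [0b10001,0b10001,0b10001,0b10001,0b10101,0b10101,0b10101,0b01010,0b01010],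
--     'A': [0b00100,0b01010,0b01010,0b10001,0b10001,0b11111,0b10001,0b10001,0b10001],
--     'R': [0b11110,0b10001,0b10001,0b10001,0b11110,0b10100,0b10010,0b10001,0b10001],
--     'M': [0b10001,0b11011,0b11011,0b10101,0b10101,0b10001,0b10001,0b10001,0b10001],
--     ' ': [0b00000]*9,
-- }
--
-- CHAR_COLS = 5
--
-- CHAR_GAP  = 1
--
-- def pixel_set(text):
--     on = set()
--     col = 0
--     for ch in text:
--         bmp = FONT.get(ch, FONT[' '])
--         for ri, row in enumerate(bmp):
--             for ci in range(CHAR_COLS):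
--                 if row & (1 << (CHAR_COLS - 1 - ci)):
--                     on.add((col + ci, ri))
--         col += CHAR_COLS + CHAR_GAP
--     return on, col
-- ===== SOURCE B (Python) =====
-- FONT = {
--     'D': [0b11110,0b10001,0b10001,0b10001,0b10001,0b10001,0b10001,0b10001,0b11110],
--     'O': [0b01110,0b10001,0b10001,0b10001,0b10001,0b10001,0b10001,0b10001,0b01110],
--     'T': [0b11111,0b00100,0b00100,0b00100,0b00100,0b00100,0b00100,0b00100,0b00100],
--     'S': [0b01111,0b10000,0b10000,0b10000,0b01110,0b00001,0b00001,0b00001,0b11110],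
--     'W': [0b10001,0b10001,0b10001,0b10001,0b10101,0b10101,0b10101,0b01010,0b01010],
--     'A': [0b00100,0b01010,0b01010,0b10001,0b10001,0b11111,0b10001,0b10001,0b10001],
--     'R': [0b11110,0b10001,0b10001,0b10001,0b11110,0b10100,0b10010,0b10001,0b10001],
--     'M': [0b10001,0b11011,0b11011,0b10101,0b10101,0b10001,0b10001,0b10001,0b10001],
--     ' ': [0b00000]*9,
-- }
--
-- CHAR_COLS = 5
--
-- CHAR_GAP = 1
--
--
-- def _offsets(bmp):
--     return [(ci, ri)
--             for ri, row in enumerate(bmp)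
--             for ci in range(CHAR_COLS)
--             if (row >> (CHAR_COLS - 1 - ci)) & 1]
--
--
-- # precomputed once: each character's on-pixel (ci, ri) offsets
-- CHAR_PIXELS = {ch: _offsets(bmp) for ch, bmp in FONT.items()}
--
--
-- def pixel_set(text):
--     on = set()
--     col = 0
--     for ch in text:
--         for ci, ri in CHAR_PIXELS.get(ch, CHAR_PIXELS[' ']):
--             on.add((col + ci, ri))
--         col += CHAR_COLS + CHAR_GAP
--     return on, col
-- ===== Notes on version B (the rewrite author's own statement) =====
-- stated objective: faster
-- what changed: pixel_set no longer runs the per-pixel row/bit-mask double inner loop: a module-level table CHAR_PIXELS, derived once from the bitmaps, maps each character to its list of on-pixel (ci, ri) offsets, and the function just translates those offsets by the current column.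
import Mathlib
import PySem

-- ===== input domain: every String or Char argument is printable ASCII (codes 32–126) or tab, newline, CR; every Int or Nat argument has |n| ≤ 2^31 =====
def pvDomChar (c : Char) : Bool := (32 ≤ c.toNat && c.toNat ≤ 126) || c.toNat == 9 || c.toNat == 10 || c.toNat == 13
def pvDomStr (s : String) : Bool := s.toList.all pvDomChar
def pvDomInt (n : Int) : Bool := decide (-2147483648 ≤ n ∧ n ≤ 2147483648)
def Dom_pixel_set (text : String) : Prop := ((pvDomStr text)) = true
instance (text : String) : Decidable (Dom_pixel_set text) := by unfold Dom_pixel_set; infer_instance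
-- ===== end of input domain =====

-- B replaces A's per-pixel row/bit-mask inner loops by a table of precomputed on-pixel
-- offsets per character, built once from the bitmaps ("simpler"); return value only.

-- ===== PORT A =====
def FONT : PySem.Dict Char (List Int) := PySem.Dict.ofList
  [ ('D', [30,17,17,17,17,17,17,17,30])
  , ('O', [14,17,17,17,17,17,17,17,14])
  , ('T', [31,4,4,4,4,4,4,4,4])
  , ('S', [15,16,16,16,14,1,1,1,30])
  , ('W', [17,17,17,17,21,21,21,10,10])
  , ('A', [4,10,10,17,17,31,17,17,17])
  , ('R', [30,17,17,17,30,20,18,17,17])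
  , ('M', [17,27,27,21,21,17,17,17,17])
  , (' ', [0,0,0,0,0,0,0,0,0]) ]

-- one iteration of A's 'for ch in text' loop; state is (on, col).
-- '1 << (CHAR_COLS-1-ci)': the shift amount 4-ci with ci ∈ range(5) is always ≥ 0, so .toNat is
-- exact; FONT[' '] is present, so '.getD []' for it is exact; 'if row & mask:' is 'mask-bit ≠ 0'.
def pixelA_step (st : PySem.Set (Int × Int) × Int) (ch : Char) : PySem.Set (Int × Int) × Int :=
  let bmp := (PySem.Dict.get? FONT ch).getD ((PySem.Dict.get? FONT ' ').getD [])
  let on := (PySem.List.enumerate bmp).foldl (fun on p =>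
      (PySem.List.pyRange 0 5 1).foldl (fun on ci =>
          if Int.land p.2 (Int.shiftLeft 1 ((5 - 1 - ci).toNat)) != 0
          then PySem.Set.add on (st.2 + ci, p.1) else on) on) st.1
  (on, st.2 + (5 + 1))

def pixel_set (text : String) : (List (Int × Int)) × Int :=
  text.toList.foldl pixelA_step (PySem.Set.empty, 0)

-- ===== PORT B =====
-- _offsets(bmp): the comprehension over (ri,row) then ci, keeping ci with (row >> (4-ci)) & 1 set
def offsetsB (bmp : List Int) : List (Int × Int) :=
  (PySem.List.enumerate bmp).flatMap (fun p =>
    ((PySem.List.pyRange 0 5 1).filter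
        (fun ci => Int.land (Int.shiftRight p.2 ((5 - 1 - ci).toNat)) 1 != 0)).map
      (fun ci => (ci, p.1)))

-- CHAR_PIXELS = {ch: _offsets(bmp) for ch, bmp in FONT.items()}
def CHAR_PIXELS : PySem.Dict Char (List (Int × Int)) :=
  PySem.Dict.ofList ((PySem.Dict.items FONT).map (fun p => (p.1, offsetsB p.2)))

-- one iteration of B's loop: translate the precomputed offsets by the current column
def pixelB_step (st : PySem.Set (Int × Int) × Int) (ch : Char) : PySem.Set (Int × Int) × Int :=
  let offs := (PySem.Dict.get? CHAR_PIXELS ch).getD ((PySem.Dict.get? CHAR_PIXELS ' ').getD [])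
  (offs.foldl (fun on q => PySem.Set.add on (st.2 + q.1, q.2)) st.1, st.2 + (5 + 1))

def pixel_set_alt (text : String) : (List (Int × Int)) × Int :=
  text.toList.foldl pixelB_step (PySem.Set.empty, 0)

-- ===== PRECONDITION & SPEC =====
def Spec_pixel_set (text : String) (out : (List (Int × Int)) × Int) : Prop := out = pixel_set_alt text
instance (text : String) (out : (List (Int × Int)) × Int) : Decidable (Spec_pixel_set text out) := by unfold Spec_pixel_set; infer_instance

-- ===== CLAIM (what is proved, stated in full; the proofs are below) =====
def Claim_equal_pixel_set : Prop := ∀ (text : String), Dom_pixel_set text → Spec_pixel_set text (pixel_set text)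

-- ===== LEMMAS AND PROOFS =====

-- both dicts, evaluated to literal form, so get? unfolds via get?_mk_cons
set_option maxHeartbeats 1000000 in
theorem FONT_eval : FONT = PySem.Dict.mk
  [ ('D', [30,17,17,17,17,17,17,17,30])
  , ('O', [14,17,17,17,17,17,17,17,14])
  , ('T', [31,4,4,4,4,4,4,4,4])
  , ('S', [15,16,16,16,14,1,1,1,30])
  , ('W', [17,17,17,17,21,21,21,10,10])
  , ('A', [4,10,10,17,17,31,17,17,17])
  , ('R', [30,17,17,17,30,20,18,17,17])
  , ('M', [17,27,27,21,21,17,17,17,17])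
  , (' ', [0,0,0,0,0,0,0,0,0]) ] := by decide

set_option maxHeartbeats 1000000 in
theorem CHAR_PIXELS_eval : CHAR_PIXELS = PySem.Dict.mk
  [ ('D', offsetsB [30,17,17,17,17,17,17,17,30])
  , ('O', offsetsB [14,17,17,17,17,17,17,17,14])
  , ('T', offsetsB [31,4,4,4,4,4,4,4,4])
  , ('S', offsetsB [15,16,16,16,14,1,1,1,30])
  , ('W', offsetsB [17,17,17,17,21,21,21,10,10])
  , ('A', offsetsB [4,10,10,17,17,31,17,17,17])
  , ('R', offsetsB [30,17,17,17,30,20,18,17,17])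
  , ('M', offsetsB [17,27,27,21,21,17,17,17,17])
  , (' ', offsetsB [0,0,0,0,0,0,0,0,0]) ] := by decide

-- A's on-pixels of one bitmap, as the flat list of (ci, ri) in A's visit order
def offsA (bmp : List Int) : List (Int × Int) :=
  (PySem.List.enumerate bmp).flatMap (fun p =>
    ((PySem.List.pyRange 0 5 1).filter
        (fun ci => Int.land p.2 (Int.shiftLeft 1 ((5 - 1 - ci).toNat)) != 0)).map
      (fun ci => (ci, p.1)))

-- A's nested per-character loops are the fold of Set.add over offsA
theorem foldA (bmp : List Int) (on : PySem.Set (Int × Int)) (col : Int) :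
    (PySem.List.enumerate bmp).foldl (fun on p =>
      (PySem.List.pyRange 0 5 1).foldl (fun on ci =>
        if Int.land p.2 (Int.shiftLeft 1 ((5 - 1 - ci).toNat)) != 0
        then PySem.Set.add on (col + ci, p.1) else on) on) on
    = (offsA bmp).foldl (fun on q => PySem.Set.add on (col + q.1, q.2)) on := by
  rw [offsA, List.foldl_flatMap]
  congr 1
  funext on p
  rw [List.foldl_map, List.foldl_filter]

-- what each character fetches: B's table entry is exactly offsA of A's bitmap
theorem lookup_eq (ch : Char) :
    offsA ((PySem.Dict.get? FONT ch).getD ((PySem.Dict.get? FONT ' ').getD []))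
    = (PySem.Dict.get? CHAR_PIXELS ch).getD ((PySem.Dict.get? CHAR_PIXELS ' ').getD []) := by
  by_cases hD : ch = 'D'; · subst hD; decide
  by_cases hO : ch = 'O'; · subst hO; decide
  by_cases hT : ch = 'T'; · subst hT; decide
  by_cases hS : ch = 'S'; · subst hS; decide
  by_cases hW : ch = 'W'; · subst hW; decide
  by_cases hA : ch = 'A'; · subst hA; decide
  by_cases hR : ch = 'R'; · subst hR; decide
  by_cases hM : ch = 'M'; · subst hM; decide
  by_cases hSp : ch = ' '; · subst hSp; decide
  have f : ∀ (c : Char), ch ≠ c → (c == ch) = false :=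
    fun c h => beq_eq_false_iff_ne.mpr (Ne.symm h)
  have hF : PySem.Dict.get? FONT ch = none := by
    rw [FONT_eval]
    simp only [PySem.Dict.get?_mk_cons, f 'D' hD, f 'O' hO, f 'T' hT, f 'S' hS,
      f 'W' hW, f 'A' hA, f 'R' hR, f 'M' hM, f ' ' hSp, Bool.false_eq_true, if_false]
    rfl
  have hC : PySem.Dict.get? CHAR_PIXELS ch = none := by
    rw [CHAR_PIXELS_eval]
    simp only [PySem.Dict.get?_mk_cons, f 'D' hD, f 'O' hO, f 'T' hT, f 'S' hS,
      f 'W' hW, f 'A' hA, f 'R' hR, f 'M' hM, f ' ' hSp, Bool.false_eq_true, if_false]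
    rfl
  rw [hF, hC]
  decide

theorem step_eq : pixelA_step = pixelB_step := by
  funext st ch
  simp only [pixelA_step, pixelB_step]
  rw [foldA, lookup_eq]

theorem pixel_set_spec : Claim_equal_pixel_set := by
  intro text _
  unfold Spec_pixel_set pixel_set pixel_set_alt
  rw [step_eq]
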